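-- pv_equiv track=rewrite | github.com/brianssparetime/SCADwright | tests/test_scad_use_include.py | _non_comment_lines
-- ===== SOURCE A (Python) =====
-- def _non_comment_lines(s: str) -> list[str]:
--     """Strip the generated-file banner (leading // comments + the blank
--     line that separates it from the body) so tests can anchor on real
--     content."""
--     lines = s.splitlines()
--     started = False
--     out = []
--     for ln in lines:
--         if not started:
--             if ln.startswith("//") or ln == "":
--                 continue
--             started = True
--         out.append(ln)
--     return out
-- ===== SOURCE B (Python) =====
-- def _non_comment_lines(s: str) -> list[str]:
--     """Strip the generated-file banner: find the index of the first real
--     content line, then slice the rest."""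
--     lines = s.splitlines()
--     i = 0
--     n = len(lines)
--     while i < n and (lines[i].startswith("//") or lines[i] == ""):
--         i += 1
--     return lines[i:]
-- ===== Notes on version B (the rewrite author's own statement) =====
-- stated objective: idiomatic
-- what changed: Replaced the flag-driven accumulating loop with a find-the-boundary-index scan followed by a single slice lines[i:], eliminating the boolean flag and the per-line append.
import Mathlib
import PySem

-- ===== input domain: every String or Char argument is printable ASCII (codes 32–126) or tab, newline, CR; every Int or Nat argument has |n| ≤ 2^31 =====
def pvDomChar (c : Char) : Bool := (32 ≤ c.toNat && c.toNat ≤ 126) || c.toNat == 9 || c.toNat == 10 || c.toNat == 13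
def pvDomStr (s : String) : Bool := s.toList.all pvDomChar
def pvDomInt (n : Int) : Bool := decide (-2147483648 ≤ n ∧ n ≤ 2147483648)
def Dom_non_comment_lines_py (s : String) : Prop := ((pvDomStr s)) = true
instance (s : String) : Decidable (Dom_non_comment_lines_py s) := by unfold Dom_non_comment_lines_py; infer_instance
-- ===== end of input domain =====

-- B replaces A's flag-driven accumulating loop by a find-the-boundary-index scan plus one slice (idiomatic; same cost).

-- ===== PORT A =====
-- A's for-loop over the lines with the 'started' flag and the accumulating 'out' list
def nclLoopA (lines : List String) (started : Bool) (out : List String) : List String :=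
  match lines with
  | [] => out
  | ln :: rest =>
    if !started then
      if PySem.Str.startswith ln "//" || ln == "" then
        nclLoopA rest started out
      else
        nclLoopA rest true (out ++ [ln])
    else
      nclLoopA rest started (out ++ [ln])

def non_comment_lines_py (s : String) : List String :=
  nclLoopA (PySem.Str.splitlines s) false []

-- ===== PORT B =====
-- B's while loop advancing index i past the leading banner lines (recursion on the suffix at i)
def nclFindB (lines : List String) (i : Nat) : Nat :=
  match lines with
  | [] => i
  | ln :: rest =>
    if PySem.Str.startswith ln "//" || ln == "" then nclFindB rest (i + 1) else i

def non_comment_lines_py_alt (s : String) : List String :=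
  let lines := PySem.Str.splitlines s
  PySem.List.slice lines (some ((nclFindB lines 0 : Nat) : Int)) none

-- ===== PRECONDITION & SPEC =====
def Spec_non_comment_lines_py (s : String) (out : List String) : Prop := out = non_comment_lines_py_alt s
instance (s : String) (out : List String) : Decidable (Spec_non_comment_lines_py s out) := by unfold Spec_non_comment_lines_py; infer_instance

-- ===== CLAIM (what is proved, stated in full; the proofs are below) =====
def Claim_equal_non_comment_lines_py : Prop := ∀ (s : String), Dom_non_comment_lines_py s → Spec_non_comment_lines_py s (non_comment_lines_py s)

-- ===== LEMMAS AND PROOFS =====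

theorem nclLoopA_started (rest : List String) : ∀ (out : List String), nclLoopA rest true out = out ++ rest := by
  induction rest with
  | nil => intro out; simp [nclLoopA]
  | cons ln rs ih => intro out; simp [nclLoopA, ih]

theorem nclFindB_shift (l : List String) : ∀ (i : Nat), nclFindB l i = i + nclFindB l 0 := by
  induction l with
  | nil => intro i; simp [nclFindB]
  | cons x xs ih =>
    intro i
    by_cases hx : PySem.Chars.startswith x.toList ['/', '/'] = true ∨ x = ""
    · simp [nclFindB, hx]
      rw [ih (i + 1), ih 1]; omega
    · simp [nclFindB, hx]

theorem nclLoopA_eq_drop (lines : List String) :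
    nclLoopA lines false [] = lines.drop (nclFindB lines 0) := by
  induction lines with
  | nil => simp [nclLoopA, nclFindB]
  | cons ln rest ih =>
    by_cases h : PySem.Chars.startswith ln.toList ['/', '/'] = true ∨ ln = ""
    · simp [nclLoopA, nclFindB, h, ih, nclFindB_shift rest 1]
      rw [Nat.add_comm, List.drop_succ_cons]
    · simp [nclLoopA, nclFindB, h, nclLoopA_started]

-- ===== VERDICT (by name: the statement is the Claim_ definition above) =====
theorem non_comment_lines_py_spec : Claim_equal_non_comment_lines_py := by
  intro s _
  unfold Spec_non_comment_lines_py non_comment_lines_py non_comment_lines_py_alt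
  rw [nclLoopA_eq_drop, PySem.List.slice_from_natCast]
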